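-- pv_equiv track=rewrite | github.com/seokheounjo/Course_registration | processors/table_processor.py | _cluster_coordinates
-- ===== SOURCE A (Python) =====
-- from typing import List, Dict, Optional, Tuple, Any
--
-- def _cluster_coordinates(coords: List[int], threshold: int = 20) -> List[int]:
--     """좌표 클러스터링"""
--     if not coords:
--         return []
--
--     clusters = []
--     current_cluster = [coords[0]]
--
--     for coord in coords[1:]:
--         if coord - current_cluster[-1] <= threshold:
--             current_cluster.append(coord)
--         else:
--             clusters.append(sum(current_cluster) // len(current_cluster))
--             current_cluster = [coord]
--
--     clusters.append(sum(current_cluster) // len(current_cluster))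
--
--     return clusters
-- ===== SOURCE B (Python) =====
-- def _cluster_coordinates(coords, threshold=20):
--     """좌표 클러스터링 (two phases: segment lengths first, then averages)"""
--     if not coords:
--         return []
--     # phase 1: run lengths of the clusters, from consecutive gaps
--     lengths = []
--     run = 1
--     for prev, cur in zip(coords, coords[1:]):
--         if cur - prev > threshold:
--             lengths.append(run)
--             run = 1
--         else:
--             run += 1
--     lengths.append(run)
--     # phase 2: consume coords by those lengths, emitting each average
--     out = []
--     rest = coords
--     for k in lengths:
--         out.append(sum(rest[:k]) // k)
--         rest = rest[k:]
--     return out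
-- ===== Notes on version B (the rewrite author's own statement) =====
-- stated objective: alternative
-- what changed: Replaces the single inline flush-as-you-go accumulator loop by two clearly separated passes: one pass over consecutive pairs computes the list of cluster run-lengths, and a second pass slices the list by those lengths and emits each segment's floor-average.
import Mathlib
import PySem

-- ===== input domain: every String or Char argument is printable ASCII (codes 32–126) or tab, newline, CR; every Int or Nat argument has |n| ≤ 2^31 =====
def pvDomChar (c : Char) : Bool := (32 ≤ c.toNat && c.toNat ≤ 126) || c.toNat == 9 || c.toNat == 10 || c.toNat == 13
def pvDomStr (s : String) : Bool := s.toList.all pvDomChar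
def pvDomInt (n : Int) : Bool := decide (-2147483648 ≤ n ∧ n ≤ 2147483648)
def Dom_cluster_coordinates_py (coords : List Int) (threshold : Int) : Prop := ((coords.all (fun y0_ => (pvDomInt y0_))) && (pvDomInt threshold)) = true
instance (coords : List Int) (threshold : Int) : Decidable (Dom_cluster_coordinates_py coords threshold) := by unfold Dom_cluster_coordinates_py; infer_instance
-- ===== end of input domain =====

-- B replaces A's inline flush-as-you-go accumulator by two separated passes
-- (cluster run-lengths from consecutive gaps, then slice-and-average); same cost, alternative decomposition.

-- ===== PORT A =====
-- loop body of A's single for-loop (state = (clusters, current_cluster))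
def pvStepA (threshold : Int) (st : List Int × List Int) (coord : Int) : List Int × List Int :=
  if coord - (PySem.List.pyGet? st.2 (-1)).getD 0 ≤ threshold then
    (st.1, st.2 ++ [coord])
  else
    (st.1 ++ [PySem.Int.floordiv st.2.sum st.2.length], [coord])

def cluster_coordinates_py (coords : List Int) (threshold : Int) : List Int :=
  match coords with
  | [] => []
  | c0 :: _ =>
    let st := (PySem.List.slice coords (some 1) none).foldl (pvStepA threshold) ([], [c0])
    st.1 ++ [PySem.Int.floordiv st.2.sum st.2.length]

-- ===== PORT B =====
-- phase-1 loop body (state = (lengths, run))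
def pvStepLen (threshold : Int) (st : List Int × Int) (p : Int × Int) : List Int × Int :=
  if p.2 - p.1 > threshold then (st.1 ++ [st.2], 1) else (st.1, st.2 + 1)

-- phase-2 loop body (state = (out, rest))
def pvStepOut (st : List Int × List Int) (k : Int) : List Int × List Int :=
  (st.1 ++ [PySem.Int.floordiv (PySem.List.slice st.2 none (some k)).sum k],
   PySem.List.slice st.2 (some k) none)

def cluster_coordinates_py_alt (coords : List Int) (threshold : Int) : List Int :=
  match coords with
  | [] => []
  | _ :: _ =>
    let st := (coords.zip (PySem.List.slice coords (some 1) none)).foldl (pvStepLen threshold) ([], 1)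
    let lengths := st.1 ++ [st.2]
    (lengths.foldl pvStepOut ([], coords)).1

-- ===== PRECONDITION & SPEC =====
def Spec_cluster_coordinates_py (coords : List Int) (threshold : Int) (out : List Int) : Prop := out = cluster_coordinates_py_alt coords threshold
instance (coords : List Int) (threshold : Int) (out : List Int) : Decidable (Spec_cluster_coordinates_py coords threshold out) := by unfold Spec_cluster_coordinates_py; infer_instance

-- ===== CLAIM (what is proved, stated in full; the proofs are below) =====
def Claim_equal_cluster_coordinates_py : Prop := ∀ (coords : List Int) (threshold : Int), Dom_cluster_coordinates_py coords threshold → Spec_cluster_coordinates_py coords threshold (cluster_coordinates_py coords threshold)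

-- ===== LEMMAS AND PROOFS =====

-- the value of current_cluster[-1]
def pvLastD (cur : List Int) : Int := (PySem.List.pyGet? cur (-1)).getD 0

-- sum(g) // len(g)
def pvAvg (g : List Int) : Int := PySem.Int.floordiv g.sum g.length

-- prepend one element onto a group structure (merging with the first group iff the gap is small)
def pvStepG (t x : Int) (gs : List (List Int)) : List (List Int) :=
  match gs with
  | [] => [[x]]
  | g :: gs' => if g.headD 0 - x ≤ t then (x :: g) :: gs' else [x] :: g :: gs'

-- the cluster groups of a list
def pvChop (t : Int) (l : List Int) : List (List Int) := l.foldr (pvStepG t) []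

-- groups when a nonempty current cluster `cur` is already open and `xs` remains
def pvGlue (t : Int) (cur xs : List Int) : List (List Int) :=
  match pvChop t xs with
  | [] => [cur]
  | g :: gs => if g.headD 0 - pvLastD cur ≤ t then (cur ++ g) :: gs else cur :: g :: gs

-- recursive restatement of A's loop (remaining input, current cluster)
def pvLoopA (t : Int) : List Int → List Int → List Int
  | [], cur => [pvAvg cur]
  | c :: rest, cur =>
    if c - pvLastD cur ≤ t then pvLoopA t rest (cur ++ [c])
    else pvAvg cur :: pvLoopA t rest [c]

-- recursive restatement of B's phase-1 loop (previous element, remaining, lengths, run)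
def pvLoop1 (t : Int) : Int → List Int → List Int → Int → List Int
  | _, [], lens, run => lens ++ [run]
  | p, x :: r, lens, run =>
    if x - p > t then pvLoop1 t x r (lens ++ [run]) 1 else pvLoop1 t x r lens (run + 1)

theorem pvLastD_append (ys : List Int) (c : Int) : pvLastD (ys ++ [c]) = c := by
  simp [pvLastD, PySem.List.pyGet?_neg_one_append_singleton]

theorem pvLastD_single (c : Int) : pvLastD [c] = c := pvLastD_append [] c

theorem pvStepG_shape (t x : Int) (gs : List (List Int)) :
    ∃ g' gs', pvStepG t x gs = (x :: g') :: gs' := by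
  cases gs with
  | nil => exact ⟨[], [], rfl⟩
  | cons g gs' =>
    by_cases h : g.headD 0 - x ≤ t
    · exact ⟨g, gs', by simp only [pvStepG]; rw [if_pos h]⟩
    · exact ⟨[], g :: gs', by simp only [pvStepG]; rw [if_neg h]⟩

theorem pvFoldA (t : Int) (xs : List Int) : ∀ (cl cur : List Int),
    (xs.foldl (pvStepA t) (cl, cur)).1 ++ [pvAvg (xs.foldl (pvStepA t) (cl, cur)).2]
      = cl ++ pvLoopA t xs cur := by
  induction xs with
  | nil => intro cl cur; simp [pvLoopA, pvAvg]
  | cons c rest ih =>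
    intro cl cur
    by_cases h : c - pvLastD cur ≤ t
    · have hA : pvStepA t (cl, cur) c = (cl, cur ++ [c]) := by
        simp [pvStepA, pvLastD] at h ⊢; simp [h]
      simp only [List.foldl_cons, hA, ih, pvLoopA, if_pos h]
    · have hA : pvStepA t (cl, cur) c = (cl ++ [pvAvg cur], [c]) := by
        simp [pvStepA, pvLastD, pvAvg] at h ⊢; simp [h]
      simp only [List.foldl_cons, hA, ih, pvLoopA, if_neg h]
      simp

theorem pvGlue_single (t c : Int) (rest : List Int) :
    pvGlue t [c] rest = pvStepG t c (pvChop t rest) := by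
  cases hre : rest with
  | nil => simp [pvGlue, pvChop, pvStepG]
  | cons r l =>
    obtain ⟨g', gs', hsh⟩ := pvStepG_shape t r (pvChop t l)
    have hch : pvChop t (r :: l) = (r :: g') :: gs' := by
      simpa [pvChop] using hsh
    have hl : pvLastD [c] = c := pvLastD_append [] c
    by_cases h : r - c ≤ t <;>
      simp [pvGlue, hch, hl, pvStepG, h]

theorem pvGlue_merge (t : Int) (cur : List Int) (c : Int) (rest : List Int)
    (h : c - pvLastD cur ≤ t) :
    pvGlue t cur (c :: rest) = pvGlue t (cur ++ [c]) rest := by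
  cases hre : rest with
  | nil =>
    simp [pvGlue, pvChop, pvStepG, h]
  | cons r l =>
    obtain ⟨g', gs', hsh⟩ := pvStepG_shape t r (pvChop t l)
    have hch : pvChop t (r :: l) = (r :: g') :: gs' := by
      simpa [pvChop] using hsh
    have hc : pvChop t (c :: r :: l) = pvStepG t c ((r :: g') :: gs') := by
      simp [pvChop] at hsh ⊢; rw [hsh]
    by_cases hrc : r - c ≤ t
    · simp [pvGlue, hc, hch, pvStepG, hrc, pvLastD_append, h]
    · simp [pvGlue, hc, hch, pvStepG, hrc, pvLastD_append, h]

theorem pvGlue_nomerge (t : Int) (cur : List Int) (c : Int) (rest : List Int)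
    (h : ¬ c - pvLastD cur ≤ t) :
    pvGlue t cur (c :: rest) = cur :: pvStepG t c (pvChop t rest) := by
  obtain ⟨g', gs', hsh⟩ := pvStepG_shape t c (pvChop t rest)
  have hc : pvChop t (c :: rest) = (c :: g') :: gs' := by
    simpa [pvChop] using hsh
  simp [pvGlue, hc, h, hsh]

theorem pvLoopA_glue (t : Int) (xs : List Int) : ∀ (cur : List Int),
    pvLoopA t xs cur = (pvGlue t cur xs).map pvAvg := by
  induction xs with
  | nil => intro cur; simp [pvLoopA, pvGlue, pvChop]
  | cons c rest ih =>
    intro cur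
    by_cases h : c - pvLastD cur ≤ t
    · rw [pvLoopA, if_pos h, ih, pvGlue_merge t cur c rest h]
    · rw [pvLoopA, if_neg h, ih, pvGlue_nomerge t cur c rest h, ← pvGlue_single]
      simp

theorem pvChop_flatten (t : Int) (l : List Int) : (pvChop t l).flatten = l := by
  induction l with
  | nil => rfl
  | cons x xs ih =>
    obtain ⟨g', gs', hsh⟩ := pvStepG_shape t x (pvChop t xs)
    have hx : pvChop t (x :: xs) = (x :: g') :: gs' := by simpa [pvChop] using hsh
    have : (pvStepG t x (pvChop t xs)).flatten = x :: (pvChop t xs).flatten := by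
      cases hg : pvChop t xs with
      | nil => simp [pvStepG]
      | cons g gs =>
        by_cases h : g.headD 0 - x ≤ t
        · simp only [pvStepG]; rw [if_pos h]; simp
        · simp only [pvStepG]; rw [if_neg h]; simp
    have hx2 : (pvChop t (x :: xs)).flatten = x :: (pvChop t xs).flatten := by
      simpa [pvChop] using this
    rw [hx2, ih]

theorem pvFold1 (t : Int) (xs : List Int) : ∀ (p : Int) (lens : List Int) (run : Int),
    ((((p :: xs).zip xs).foldl (pvStepLen t) (lens, run)).1
      ++ [(((p :: xs).zip xs).foldl (pvStepLen t) (lens, run)).2])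
    = pvLoop1 t p xs lens run := by
  induction xs with
  | nil => intro p lens run; simp [pvLoop1]
  | cons x r ih =>
    intro p lens run
    have hz : (p :: x :: r).zip (x :: r) = (p, x) :: (x :: r).zip r := rfl
    by_cases h : x - p > t
    · have hs : pvStepLen t (lens, run) (p, x) = (lens ++ [run], 1) := by
        simp [pvStepLen, h]
      rw [hz, List.foldl_cons, hs, ih, pvLoop1, if_pos h]
    · have hs : pvStepLen t (lens, run) (p, x) = (lens, run + 1) := by
        simp [pvStepLen] at h ⊢; simp [h]
      rw [hz, List.foldl_cons, hs, ih, pvLoop1, if_neg h]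

theorem pvLoop1_glue (t : Int) (xs : List Int) : ∀ (cur lens : List Int),
    pvLoop1 t (pvLastD cur) xs lens (cur.length : Int)
      = lens ++ (pvGlue t cur xs).map (fun g => (g.length : Int)) := by
  induction xs with
  | nil => intro cur lens; simp [pvLoop1, pvGlue, pvChop]
  | cons x r ih =>
    intro cur lens
    by_cases h : x - pvLastD cur > t
    · have h' : ¬ x - pvLastD cur ≤ t := by omega
      rw [pvLoop1, if_pos h, pvGlue_nomerge t cur x r h']
      have h2 := ih [x] (lens ++ [(cur.length : Int)])
      rw [pvLastD_single, pvGlue_single] at h2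
      simp only [List.length_singleton, Nat.cast_one] at h2
      rw [h2]
      simp
    · have h' : x - pvLastD cur ≤ t := by omega
      rw [pvLoop1, if_neg h, pvGlue_merge t cur x r h']
      have h2 := ih (cur ++ [x]) lens
      rw [pvLastD_append] at h2
      simp only [List.length_append, List.length_singleton, Nat.cast_add, Nat.cast_one] at h2
      rw [h2]

theorem pvFold2 (gs : List (List Int)) : ∀ (out : List Int),
    ((gs.map (fun g => (g.length : Int))).foldl pvStepOut (out, gs.flatten)).1
      = out ++ gs.map pvAvg := by
  induction gs with
  | nil => intro out; simp
  | cons g gs' ih =>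
    intro out
    have hs : pvStepOut (out, (g :: gs').flatten) ((g.length : Int))
        = (out ++ [pvAvg g], gs'.flatten) := by
      simp [pvStepOut, PySem.List.slice_to_natCast, PySem.List.slice_from_natCast, pvAvg]
    simp only [List.map_cons, List.foldl_cons, hs, ih]
    simp

theorem pvA_eq (coords : List Int) (t : Int) :
    cluster_coordinates_py coords t = (pvChop t coords).map pvAvg := by
  cases coords with
  | nil => rfl
  | cons c0 rest =>
    have hslice : PySem.List.slice (c0 :: rest) (some 1) none = rest := by
      simp [PySem.List.slice_from_one]
    have hch : pvChop t (c0 :: rest) = pvStepG t c0 (pvChop t rest) := rfl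
    have hf := pvFoldA t rest [] [c0]
    simp only [pvAvg, List.nil_append] at hf
    simp only [cluster_coordinates_py, hslice]
    rw [hf, pvLoopA_glue, pvGlue_single, hch]

theorem pvB_eq (coords : List Int) (t : Int) :
    cluster_coordinates_py_alt coords t = (pvChop t coords).map pvAvg := by
  cases coords with
  | nil => rfl
  | cons c0 rest =>
    have hslice : PySem.List.slice (c0 :: rest) (some 1) none = rest := by
      simp [PySem.List.slice_from_one]
    have hch : pvChop t (c0 :: rest) = pvStepG t c0 (pvChop t rest) := rfl
    have hf := pvFold1 t rest c0 [] 1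
    simp only [cluster_coordinates_py_alt, hslice]
    rw [hf]
    have h2 := pvLoop1_glue t rest [c0] []
    rw [pvLastD_single, pvGlue_single] at h2
    simp only [List.length_singleton, Nat.cast_one, List.nil_append] at h2
    rw [h2, ← hch]
    conv_lhs =>
      rw [show (([], c0 :: rest) : List Int × List Int)
            = (([], (pvChop t (c0 :: rest)).flatten) : List Int × List Int) from by
          rw [pvChop_flatten]]
    rw [pvFold2, List.nil_append]

-- ===== VERDICT (by name: the statement is the Claim_ definition above) =====
theorem cluster_coordinates_py_spec : Claim_equal_cluster_coordinates_py := by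
  intro coords threshold _
  show cluster_coordinates_py coords threshold = cluster_coordinates_py_alt coords threshold
  rw [pvA_eq, pvB_eq]
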